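-- pv_equiv track=rewrite | github.com/DecentrAI/BlockOne | timelockpuzzle/puzzle_lib.py | _successive_squares
-- ===== SOURCE A (Python) =====
-- def _successive_squares(base: int, mod: int, length: int) -> [int]:
--     table = [base % mod]
--     prev = base % mod
--     for n in range(1, length):
--         squared = prev**2 % mod
--         table.append(squared)
--         prev = squared
--     return table
-- ===== SOURCE B (Python) =====
-- def _successive_squares(base: int, mod: int, length: int) -> [int]:
--     first = base % mod
--     table = [first]
--     seen = {first: 0}
--     while len(table) < length:
--         nxt = table[-1] ** 2 % mod
--         hit = seen.get(nxt)
--         if hit is not None: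
--             period = len(table) - hit
--             cycle = table[hit:]
--             rest = length - len(table)
--             return table + cycle * (rest // period) + cycle[:rest % period]
--         seen[nxt] = len(table)
--         table.append(nxt)
--     return table
-- ===== Notes on version B (the rewrite author's own statement) =====
-- stated objective: faster
-- what changed: Replaces A's unconditional square-the-previous-entry loop by cycle detection on the orbit of the squaring map (a dict value -> first index); once a repeated value appears the rest of the table is filled by repeating the detected cycle instead of performing further modular multiplications.
import Mathlib
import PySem

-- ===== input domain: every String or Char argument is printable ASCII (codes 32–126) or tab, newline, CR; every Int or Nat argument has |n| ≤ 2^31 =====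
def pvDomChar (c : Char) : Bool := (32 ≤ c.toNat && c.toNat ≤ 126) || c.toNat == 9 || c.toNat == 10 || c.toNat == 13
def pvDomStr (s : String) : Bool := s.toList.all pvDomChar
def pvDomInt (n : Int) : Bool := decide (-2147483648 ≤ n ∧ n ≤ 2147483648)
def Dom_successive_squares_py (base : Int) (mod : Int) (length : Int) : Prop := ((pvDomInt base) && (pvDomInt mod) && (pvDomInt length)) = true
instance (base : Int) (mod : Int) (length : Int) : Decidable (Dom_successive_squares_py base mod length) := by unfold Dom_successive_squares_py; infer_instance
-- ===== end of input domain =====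

-- B replaces A's plain square-and-append loop by cycle detection on the orbit of the squaring
-- map (a dict value → first index), filling the rest of the table by repeating the detected
-- cycle, so it multiplies only O(min(length, orbit size)) times where A multiplies O(length) times.

-- ===== PORT A =====
-- literal port of A: seed table/prev with base % mod, then for n in range(1, length)
-- square prev modulo mod, append it and carry it forward (the growing table is kept
-- reversed and reversed once at the end — the O(1)-append idiom for Python's list.append).
def successive_squares_py (base : Int) (mod : Int) (length : Int) : List Int :=
  let first := PySem.Int.mod base mod
  let res := (PySem.List.pyRange 1 length 1).foldl
    (fun (st : List Int × Int) _n =>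
      let squared := PySem.Int.mod (st.2 ^ 2) mod
      (squared :: st.1, squared))
    ([first], first)
  res.1.reverse

-- ===== PORT B =====
-- the while loop of B, one recursive step per iteration; the growing table is kept reversed
-- (cons = Python's O(1) append, table[-1] = head) with sz = len(table) carried alongside;
-- Python's dict 'seen' (value → first index; keys are never overwritten) is ported as an
-- ordered map for evaluability — same get/insert structure and first-match semantics;
-- fuel = length - len(table) bounds the remaining iterations (the loop adds one entry or
-- returns each time round).
def pvLoopB (m L : Int) (rev : List Int) (sz : Int) (seen : Std.TreeMap Int Int) : Nat → List Int
  | 0 => rev.reverse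
  | fuel + 1 =>
    if sz < L then
      let last := rev.headD 0                      -- table[-1]
      let nxt := PySem.Int.mod (last ^ 2) m
      match seen[nxt]? with
      | some hit =>
          let table := rev.reverse
          let period := sz - hit
          let cycle := PySem.List.slice table (some hit)        -- table[hit:]
          let rest := L - sz
          -- table + cycle * (rest // period) + cycle[:rest % period]
          table ++ (List.replicate (PySem.Int.floordiv rest period).toNat cycle).flatten
                ++ PySem.List.slice cycle none (some (PySem.Int.mod rest period))
      | none => pvLoopB m L (nxt :: rev) (sz + 1) (seen.insert nxt sz) fuel
    else rev.reverse

-- literal port of B: seed with first = base % mod and seen = {first: 0}, then run the loop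
def successive_squares_py_alt (base : Int) (mod : Int) (length : Int) : List Int :=
  let first := PySem.Int.mod base mod
  pvLoopB mod length [first] 1 ((Std.TreeMap.empty).insert first 0) (length - 1).toNat

-- ===== PRECONDITION & SPEC =====
-- Pre_ excludes mod = 0, where both A and B raise ZeroDivisionError on 'base % mod'.
def Pre_successive_squares_py (base : Int) (mod : Int) (length : Int) : Prop := mod ≠ 0
instance (base : Int) (mod : Int) (length : Int) : Decidable (Pre_successive_squares_py base mod length) := by unfold Pre_successive_squares_py; infer_instance
def pvWitness_successive_squares_py : Int × Int × Int := (3, 5, 4)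

def Spec_successive_squares_py (base : Int) (mod : Int) (length : Int) (out : List Int) : Prop := out = successive_squares_py_alt base mod length
instance (base : Int) (mod : Int) (length : Int) (out : List Int) : Decidable (Spec_successive_squares_py base mod length out) := by unfold Spec_successive_squares_py; infer_instance

-- ===== CLAIM (what is proved, stated in full; the proofs are below) =====
def Claim_equal_successive_squares_py : Prop := ∀ (base : Int) (mod : Int) (length : Int), Dom_successive_squares_py base mod length → Pre_successive_squares_py base mod length → Spec_successive_squares_py base mod length (successive_squares_py base mod length)

-- ===== LEMMAS AND PROOFS =====

-- closed form of entry n: pvG base m n = base^(2^n) % m (Python %, i.e. Int.fmod)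
def pvG (base m : Int) (n : Nat) : Int := PySem.Int.mod (base ^ (2 ^ n)) m

-- squaring a residue mod m and reducing equals reducing the square of the original
theorem pvFmod_sq (a m : Int) : Int.fmod ((Int.fmod a m) ^ 2) m = Int.fmod (a ^ 2) m := by
  rw [Int.fmod_def a m,
      show (a - m * a.fdiv m) ^ 2 = a ^ 2 + m * (m * (a.fdiv m) ^ 2 - 2 * a * (a.fdiv m)) by ring,
      Int.add_mul_fmod_self_left]

theorem pvG_step (base m : Int) (n : Nat) :
    PySem.Int.mod ((pvG base m n) ^ 2) m = pvG base m (n + 1) := by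
  unfold pvG PySem.Int.mod
  rw [pvFmod_sq, ← pow_mul, show 2 ^ n * 2 = 2 ^ (n + 1) by rw [pow_succ]]

theorem pvFirst (base m : Int) : pvG base m 0 = PySem.Int.mod base m := by
  simp [pvG]

-- A's loop invariant: fold over range(1, 1+k) yields the reversed table plus the last entry
theorem pvLoopA (base m : Int) (k : Nat) :
    (PySem.List.pyRange 1 (1 + (k : Int)) 1).foldl
      (fun (st : List Int × Int) _n =>
        let squared := PySem.Int.mod (st.2 ^ 2) m
        (squared :: st.1, squared))
      ([pvG base m 0], pvG base m 0)
    = (((List.range (k + 1)).map (pvG base m)).reverse, pvG base m k) := by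
  induction k with
  | zero => simp
  | succ k ih =>
      rw [show (1 : Int) + ((k : Nat) + 1 : Nat) = (1 + (k : Int)) + 1 by push_cast; ring,
          PySem.List.pyRange_one_succ_right (by omega), List.foldl_append, ih]
      simp only [List.foldl_cons, List.foldl_nil, pvG_step]
      rw [List.range_succ (n := k + 1), List.map_append]
      simp

-- A's port computes the canonical table
theorem pvA_eq (base m L : Int) :
    successive_squares_py base m L = (List.range (1 + (L - 1).toNat)).map (pvG base m) := by
  unfold successive_squares_py
  dsimp only
  by_cases h : L ≤ 1
  · rw [show (L - 1).toNat = 0 by omega]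
    simp [PySem.List.pyRange_one_eq_nil h, pvFirst]
  · obtain ⟨k, hk⟩ : ∃ k : Nat, L = 1 + (k : Int) := ⟨(L - 1).toNat, by omega⟩
    subst hk
    rw [← pvFirst base m, pvLoopA base m k]
    dsimp only
    rw [List.reverse_reverse, show ((1 : Int) + (k : Int) - 1).toNat = k by omega,
        Nat.add_comm 1 k]

-- small list facts -------------------------------------------------------------

theorem pvTakeRange' (r s n : Nat) (h : r ≤ n) : List.take r (List.range' s n) = List.range' s r := by
  induction r generalizing s n with
  | zero => simp
  | succ r ih =>
      obtain ⟨n', rfl⟩ : ∃ n', n = n' + 1 := ⟨n - 1, by omega⟩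
      rw [List.range'_succ, List.take_succ_cons, ih (s + 1) n' (by omega), ← List.range'_succ]

theorem pvDropRange' (j : Nat) : ∀ (s n : Nat), List.drop j (List.range' s n) = List.range' (s + j) (n - j) := by
  induction j with
  | zero => simp
  | succ j ih =>
      intro s n
      match n with
      | 0 => simp
      | n + 1 =>
          rw [List.range'_succ, List.drop_succ_cons, ih (s + 1) n]
          congr 1 <;> omega

theorem pvHeadD (f : Nat → Int) (n : Nat) (hn : 1 ≤ n) (d : Int) :
    (((List.range n).map f).reverse).headD d = f (n - 1) := by
  obtain ⟨k, rfl⟩ : ∃ k, n = k + 1 := ⟨n - 1, by omega⟩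
  rw [List.range_succ, List.map_append, List.reverse_append]
  simp

-- periodicity machinery ---------------------------------------------------------

theorem pvPeriodic (base m : Int) (j p : Nat)
    (hbase : pvG base m (j + p) = pvG base m j) :
    ∀ x, j ≤ x → pvG base m (x + p) = pvG base m x := by
  intro x hx
  induction x, hx using Nat.le_induction with
  | base => exact hbase
  | succ x hx ih =>
      rw [show x + 1 + p = (x + p) + 1 by omega, ← pvG_step, ih, pvG_step]

theorem pvShift (t : Nat → Int) (p j : Nat)
    (hper : ∀ x, j ≤ x → t (x + p) = t x) :
    ∀ (c s : Nat), j ≤ s → (List.range' (s + p) c).map t = (List.range' s c).map t := by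
  intro c
  induction c with
  | zero => simp
  | succ c ih =>
      intro s hs
      rw [List.range'_succ, List.range'_succ, List.map_cons, List.map_cons,
          hper s hs, show s + p + 1 = (s + 1) + p by omega, ih (s + 1) (by omega)]

theorem pvFill (t : Nat → Int) (j p : Nat) (hp : 0 < p)
    (hper : ∀ x, j ≤ x → t (x + p) = t x) :
    ∀ (q r : Nat), (List.range' (j + p) (q * p + r)).map t
      = (List.replicate q ((List.range' j p).map t)).flatten ++ (List.range' (j + p) r).map t := by
  intro q
  induction q with
  | zero => simp
  | succ q ih =>
      intro r
      rw [show (q + 1) * p + r = p + (q * p + r) by ring,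
          ← List.range'_append (s := j + p) (m := p) (n := q * p + r) (step := 1),
          List.map_append]
      rw [show j + p + 1 * p = (j + p) + p by ring]
      rw [pvShift t p j hper (q * p + r) (j + p) (by omega), ih r]
      rw [pvShift t p j hper p j (by omega)]
      simp [List.replicate_succ, List.append_assoc]

-- B's loop computes the canonical table ----------------------------------------

theorem pvLoopB_eq (base m L : Int) :
    ∀ (fuel n : Nat) (rev : List Int) (seen : Std.TreeMap Int Int),
      1 ≤ n → n ≤ 1 + (L - 1).toNat → 1 + (L - 1).toNat ≤ n + fuel →
      rev = ((List.range n).map (pvG base m)).reverse →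
      (∀ v i, seen[v]? = some i → ∃ j : Nat, i = (j : Int) ∧ j < n ∧ pvG base m j = v) →
      pvLoopB m L rev (n : Int) seen fuel = (List.range (1 + (L - 1).toNat)).map (pvG base m) := by
  intro fuel
  induction fuel with
  | zero =>
      intro n rev seen h1 h2 h3 hrev _
      rw [pvLoopB, hrev, List.reverse_reverse, show n = 1 + (L - 1).toNat by omega]
  | succ fuel ih =>
      intro n rev seen h1 h2 h3 hrev hseen
      rw [pvLoopB]
      by_cases hL : (n : Int) < L
      · rw [if_pos hL]
        dsimp only
        have hlast : rev.headD 0 = pvG base m (n - 1) := by rw [hrev]; exact pvHeadD _ n h1 0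
        have hnxt : PySem.Int.mod ((rev.headD 0) ^ 2) m = pvG base m n := by
          rw [hlast]
          have := pvG_step base m (n - 1)
          rwa [show n - 1 + 1 = n by omega] at this
        rw [hnxt]
        cases hmatch : seen[pvG base m n]? with
        | none =>
            have hrec := ih (n + 1) (pvG base m n :: rev) (seen.insert (pvG base m n) (n : Int))
              (by omega) (by omega) (by omega)
              (by rw [hrev, List.range_succ, List.map_append, List.reverse_append]; simp)
              (by
                intro v i h
                rw [Std.TreeMap.getElem?_insert] at h
                split at h
                · rename_i hc
                  exact ⟨n, (Option.some.inj h).symm, by omega, compare_eq_iff_eq.mp hc⟩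
                · obtain ⟨j, rfl, hjn, hjv⟩ := hseen _ _ h
                  exact ⟨j, rfl, by omega, hjv⟩)
            rwa [show ((n + 1 : Nat) : Int) = (n : Int) + 1 by push_cast; ring] at hrec
        | some hit =>
            dsimp only
            obtain ⟨j, rfl, hjn, hjv⟩ := hseen _ _ hmatch
            have hNL : ((1 + (L - 1).toNat : Nat) : Int) = L := by omega
            set N := 1 + (L - 1).toNat with hN
            set p := n - j with hp
            have hpp : 0 < p := by omega
            have hper' : ∀ x, j ≤ x → pvG base m (x + p) = pvG base m x := by
              refine pvPeriodic base m j p ?_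
              rw [show j + p = n by omega, ← hjv]
            -- the table so far
            have htab : rev.reverse = (List.range n).map (pvG base m) := by
              rw [hrev, List.reverse_reverse]
            -- the cycle slice: table[j:] = map t (range' j p)
            have hcyc : PySem.List.slice ((List.range n).map (pvG base m)) (some (j : Int))
                = (List.range' j p).map (pvG base m) := by
              rw [PySem.List.slice_from _ (by omega : (0 : Int) ≤ (j : Int)),
                  Int.toNat_natCast, List.range_eq_range', ← List.map_drop, pvDropRange',
                  Nat.zero_add]
            -- arithmetic of rest // period and rest % period
            have hrest : L - (n : Int) = ((N - n : Nat) : Int) := by omega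
            have hperiod : (n : Int) - (j : Int) = ((p : Nat) : Int) := by omega
            set q := (N - n) / p with hq
            set r := (N - n) % p with hr
            have hfd : (PySem.Int.floordiv (L - (n : Int)) ((n : Int) - (j : Int))).toNat = q := by
              rw [hrest, hperiod, PySem.Int.floordiv_natCast, Int.toNat_natCast]
            have hmd : PySem.Int.mod (L - (n : Int)) ((n : Int) - (j : Int)) = ((r : Nat) : Int) := by
              rw [hrest, hperiod, PySem.Int.mod_natCast]
            have hrp : r < p := Nat.mod_lt _ hpp
            have htail : PySem.List.slice ((List.range' j p).map (pvG base m)) none (some ((r : Nat) : Int))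
                = (List.range' (j + p) r).map (pvG base m) := by
              rw [PySem.List.slice_to _ (by omega : (0 : Int) ≤ ((r : Nat) : Int)), Int.toNat_natCast,
                  ← List.map_take, pvTakeRange' r j p (by omega),
                  pvShift (pvG base m) p j hper' r j (by omega)]
            rw [htab, hcyc, hfd, hmd, htail]
            -- right-hand side: split the canonical table at n and unroll the cycle
            have hsplit : (List.range N).map (pvG base m)
                = (List.range n).map (pvG base m) ++ (List.range' (j + p) (q * p + r)).map (pvG base m) := by
              rw [← List.map_append]
              congr 1
              rw [show j + p = n by omega,
                  show q * p + r = N - n by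
                    rw [hq, hr, Nat.mul_comm]; exact Nat.div_add_mod _ _]
              simp only [List.range_eq_range']
              have := List.range'_append (s := 0) (m := n) (n := N - n) (step := 1)
              simp only [Nat.zero_add, Nat.one_mul] at this
              rw [this, show n + (N - n) = N by omega]
            rw [hsplit, pvFill (pvG base m) j p hpp hper' q r, List.append_assoc]
      · rw [if_neg hL, hrev, List.reverse_reverse, show n = 1 + (L - 1).toNat by omega]

theorem pvB_eq (base m L : Int) :
    successive_squares_py_alt base m L = (List.range (1 + (L - 1).toNat)).map (pvG base m) := by
  unfold successive_squares_py_alt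
  dsimp only
  rw [← pvFirst base m]
  refine pvLoopB_eq base m L ((L - 1).toNat) 1 _ _ (by omega) (by omega) (by omega) (by simp) ?_
  intro v i h
  rw [Std.TreeMap.getElem?_insert] at h
  split at h
  · rename_i hc
    exact ⟨0, (Option.some.inj h).symm, by omega, compare_eq_iff_eq.mp hc⟩
  · simp at h

-- ===== VERDICT (by name: the statement is the Claim_ definition above) =====
theorem successive_squares_py_spec : Claim_equal_successive_squares_py := by
  intro base m L _ _
  unfold Spec_successive_squares_py
  rw [pvA_eq, pvB_eq]
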